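-- pv_equiv track=rewrite | github.com/ThinkingDobby/PythonProgramming | programmers/skillcheck/lev2/1/1.py | solution
-- ===== SOURCE A (Python) =====
-- ways = [[0, 1], [0, -1], [-1, 0], [1, 0]]
--
-- def search(i, j, w, h, maps):
--     s = int(maps[i][j])
--     maps[i][j] = 'X'
--
--     for x, y in ways:
--         if 0 <= i + y < h and 0 <= j + x < w and maps[i + y][j + x] != 'X':
--             s += search(i + y, j + x, w, h, maps)
--
--     return s
--
-- def solution(maps):
--     w = len(maps[0])
--     h = len(maps)
--
--     for i in range(h):
--         maps[i] = list(maps[i])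
--
--     ans = []
--     for i in range(h):
--         for j in range(w):
--             if maps[i][j] != 'X':
--                 ans.append(search(i, j, w, h, maps))
--
--     if not ans:
--         return [-1]
--     else:
--         return sorted(ans)
-- ===== SOURCE B (Python) =====
-- def solution(maps):
--     h = len(maps)
--     w = len(maps[0])
--     grid = [list(row) for row in maps]
--     ans = []
--     for i in range(h):
--         for j in range(w):
--             if grid[i][j] != 'X':
--                 total = 0
--                 stack = [(i, j)]
--                 while stack:
--                     a, b = stack[0]
--                     stack = stack[1:]
--                     if not (0 <= a < h and 0 <= b < w) or grid[a][b] == 'X':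
--                         continue
--                     total += int(grid[a][b])
--                     grid[a][b] = 'X'
--                     stack = [(a + 1, b), (a - 1, b), (a, b - 1), (a, b + 1)] + stack
--                 ans.append(total)
--     if not ans:
--         return [-1]
--     return sorted(ans)
-- ===== Notes on version B (the rewrite author's own statement) =====
-- stated objective: alternative
-- what changed: Region summing is rewritten from A's recursive flood-fill (search calls itself on each unvisited neighbour) into an iterative work-list loop that pops a cell, skips it if already 'X', otherwise adds its digit, marks it and prepends its four neighbours; the outer row-major scan, marking discipline and sorted/[-1] return are kept.
import Mathlib
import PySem

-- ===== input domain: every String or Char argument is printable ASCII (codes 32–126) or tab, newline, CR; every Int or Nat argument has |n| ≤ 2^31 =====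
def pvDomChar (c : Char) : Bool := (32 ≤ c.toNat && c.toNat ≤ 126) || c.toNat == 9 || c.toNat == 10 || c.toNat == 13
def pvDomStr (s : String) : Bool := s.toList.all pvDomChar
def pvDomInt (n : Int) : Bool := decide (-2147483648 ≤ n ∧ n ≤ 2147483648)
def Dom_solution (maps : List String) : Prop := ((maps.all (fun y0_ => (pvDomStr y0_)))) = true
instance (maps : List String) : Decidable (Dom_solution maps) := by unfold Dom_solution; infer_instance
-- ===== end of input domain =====

-- B re-implements the recursive flood fill of A with an explicit work-list loop (alternative
-- decomposition, no speed claim); equivalence is about the RETURN value only: Python A mutates the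
-- caller's list in place while B builds its own grid copy.

-- ===== PORT A =====
-- shared grid helpers: a cell read/write guarded exactly as A's in-bounds checks guarantee
-- (out-of-range reads give 'X', which no guarded Python access ever hits on Pre_ inputs)
def pvCell (g : List (List Char)) (i j : Int) : Char :=
  if 0 ≤ i ∧ 0 ≤ j then (g.getD i.toNat []).getD j.toNat 'X' else 'X'

def pvSet (g : List (List Char)) (i j : Int) (c : Char) : List (List Char) :=
  if 0 ≤ i ∧ 0 ≤ j then g.set i.toNat ((g.getD i.toNat []).set j.toNat c) else g

-- int(maps[i][j]) on the single character (always a digit on Pre_ inputs at every call site)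
def pvDigit (c : Char) : Int := (PySem.Int.ofStr? (String.ofList [c])).getD 0

-- number of non-'X' cells: the fuel bound for the ports' recursions (Python recurses unboundedly)
def pvNonX (g : List (List Char)) : Nat :=
  (g.map (fun r => r.countP (fun c => c != 'X'))).sum

def pvWays : List (Int × Int) := [(0, 1), (0, -1), (-1, 0), (1, 0)]

-- A's recursive 'search'; fuel = pvNonX of the grid at the call site suffices (proved below)
def searchF : Nat → Int → Int → Int → Int → List (List Char) → Int × List (List Char)
  | 0, _, _, _, _, g => (0, g)
  | f + 1, i, j, w, h, g =>
    pvWays.foldl (fun p d =>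
      if 0 ≤ i + d.2 ∧ i + d.2 < h ∧ 0 ≤ j + d.1 ∧ j + d.1 < w ∧ pvCell p.2 (i + d.2) (j + d.1) ≠ 'X' then
        let r := searchF f (i + d.2) (j + d.1) w h p.2
        (p.1 + r.1, r.2)
      else p)
      (pvDigit (pvCell g i j), pvSet g i j 'X')

def solution (maps : List String) : List Int :=
  let w : Int := ((maps.headD "").toList.length : Int)
  let h : Int := (maps.length : Int)
  let grid := maps.map (fun s => s.toList)   -- the row-by-row list(maps[i]) conversion
  let st := (PySem.List.pyRange 0 h 1).foldl (fun st i =>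
    (PySem.List.pyRange 0 w 1).foldl (fun st j =>
      if pvCell st.2 i j ≠ 'X' then
        let r := searchF (pvNonX st.2) i j w h st.2
        (st.1 ++ [r.1], r.2)
      else st) st) (([] : List Int), grid)
  if st.1 = [] then [-1] else PySem.List.sorted st.1 (fun x => x) false

-- ===== PORT B =====
-- B's while loop over the explicit work list; fuel 5·pvNonX+1 suffices (proved below):
-- every popped cell either is skipped (list shrinks) or is marked (pvNonX drops, ≤ 4 pushes)
def loopF : Nat → Int → Int → List (Int × Int) → List (List Char) → Int → Int × List (List Char)
  | 0, _, _, _, g, acc => (acc, g)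
  | f + 1, w, h, stack, g, acc =>
    match stack with
    | [] => (acc, g)
    | (a, b) :: rest =>
      if ¬(0 ≤ a ∧ a < h ∧ 0 ≤ b ∧ b < w) ∨ pvCell g a b = 'X' then
        loopF f w h rest g acc
      else
        loopF f w h ([(a + 1, b), (a - 1, b), (a, b - 1), (a, b + 1)] ++ rest)
          (pvSet g a b 'X') (acc + pvDigit (pvCell g a b))

def solution_alt (maps : List String) : List Int :=
  let h : Int := (maps.length : Int)
  let w : Int := ((maps.headD "").toList.length : Int)
  let grid := maps.map (fun s => s.toList)
  let st := (PySem.List.pyRange 0 h 1).foldl (fun st i =>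
    (PySem.List.pyRange 0 w 1).foldl (fun st j =>
      if pvCell st.2 i j ≠ 'X' then
        let r := loopF (5 * pvNonX st.2 + 1) w h [(i, j)] st.2 0
        (st.1 ++ [r.1], r.2)
      else st) st) (([] : List Int), grid)
  if st.1 = [] then [-1] else PySem.List.sorted st.1 (fun x => x) false

-- ===== PRECONDITION & SPEC =====
-- Pre_ excludes exactly the inputs where Python A raises: an empty list (maps[0] → IndexError),
-- a row shorter than the first row (maps[i][j] → IndexError), or a scanned cell (first w chars
-- of a row) that is neither a digit nor 'X' (int(cell) → ValueError).
def Pre_solution (maps : List String) : Prop :=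
  maps ≠ [] ∧
  maps.all (fun s =>
    decide ((maps.headD "").toList.length ≤ s.toList.length)
    && (s.toList.take (maps.headD "").toList.length).all (fun c => c.isDigit || c == 'X')) = true
instance (maps : List String) : Decidable (Pre_solution maps) := by unfold Pre_solution; infer_instance

def pvWitness_solution : List String := ["12X", "X3X", "450"]

def Spec_solution (maps : List String) (out : List Int) : Prop := out = solution_alt maps
instance (maps : List String) (out : List Int) : Decidable (Spec_solution maps out) := by unfold Spec_solution; infer_instance

-- ===== CLAIM (what is proved, stated in full; the proofs are below) =====
def Claim_equal_solution : Prop := ∀ (maps : List String), Dom_solution maps → Pre_solution maps → Spec_solution maps (solution maps)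

-- ===== LEMMAS AND PROOFS =====

-- proof-side helpers
def pvAStep (f : Nat) (i j w h : Int) (p : Int × List (List Char)) (d : Int × Int) : Int × List (List Char) :=
  if 0 ≤ i + d.2 ∧ i + d.2 < h ∧ 0 ≤ j + d.1 ∧ j + d.1 < w ∧ pvCell p.2 (i + d.2) (j + d.1) ≠ 'X' then
    let r := searchF f (i + d.2) (j + d.1) w h p.2
    (p.1 + r.1, r.2)
  else p

lemma searchF_succ (f : Nat) (i j w h : Int) (g : List (List Char)) :
    searchF (f + 1) i j w h g
      = List.foldl (pvAStep f i j w h) (pvDigit (pvCell g i j), pvSet g i j 'X') pvWays := rfl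

lemma countP_set_X_le : ∀ (r : List Char) (n : Nat),
    (r.set n 'X').countP (fun c => c != 'X') ≤ r.countP (fun c => c != 'X') := by
  intro r
  induction r with
  | nil => intro n; simp
  | cons c t ih =>
    intro n
    cases n with
    | zero => simp only [List.set_cons_zero, List.countP_cons]; simp
    | succ n => simp only [List.set_cons_succ, List.countP_cons]; have := ih n; omega

lemma countP_set_X_lt : ∀ (r : List Char) (n : Nat), r.getD n 'X' ≠ 'X' →
    (r.set n 'X').countP (fun c => c != 'X') < r.countP (fun c => c != 'X') := by
  intro r
  induction r with
  | nil => intro n hn; simp at hn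
  | cons c t ih =>
    intro n hn
    cases n with
    | zero =>
      have hc : (c != 'X') = true := by simpa [List.getD] using hn
      simp only [List.set_cons_zero, List.countP_cons]
      simp [hc]
    | succ n =>
      simp only [List.set_cons_succ, List.countP_cons]
      have := ih n (by simpa [List.getD] using hn)
      omega

lemma nonX_cons (r : List Char) (t : List (List Char)) :
    pvNonX (r :: t) = r.countP (fun c => c != 'X') + pvNonX t := by
  simp [pvNonX]

lemma nonX_setrow_le : ∀ (g : List (List Char)) (I J : Nat),
    pvNonX (g.set I ((g.getD I []).set J 'X')) ≤ pvNonX g := by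
  intro g
  induction g with
  | nil => intro I J; simp
  | cons r t ih =>
    intro I J
    cases I with
    | zero =>
      simp only [List.set_cons_zero, List.getD_cons_zero, nonX_cons]
      have := countP_set_X_le r J
      omega
    | succ I =>
      simp only [List.set_cons_succ, List.getD_cons_succ, nonX_cons]
      have := ih I J
      omega

lemma nonX_setrow_lt : ∀ (g : List (List Char)) (I J : Nat),
    (g.getD I []).getD J 'X' ≠ 'X' →
    pvNonX (g.set I ((g.getD I []).set J 'X')) < pvNonX g := by
  intro g
  induction g with
  | nil => intro I J h; simp [List.getD] at h
  | cons r t ih =>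
    intro I J h
    cases I with
    | zero =>
      simp only [List.getD_cons_zero] at h
      simp only [List.set_cons_zero, List.getD_cons_zero, nonX_cons]
      have := countP_set_X_lt r J h
      omega
    | succ I =>
      simp only [List.getD_cons_succ] at h
      simp only [List.set_cons_succ, List.getD_cons_succ, nonX_cons]
      have := ih I J h
      omega

lemma nonX_set_le (g : List (List Char)) (i j : Int) :
    pvNonX (pvSet g i j 'X') ≤ pvNonX g := by
  unfold pvSet
  split
  · exact nonX_setrow_le g i.toNat j.toNat
  · exact le_refl _

lemma nonX_set_lt (g : List (List Char)) (i j : Int) (hc : pvCell g i j ≠ 'X') :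
    pvNonX (pvSet g i j 'X') < pvNonX g := by
  unfold pvCell at hc
  unfold pvSet
  split
  case isTrue h => exact nonX_setrow_lt g i.toNat j.toNat (by rw [if_pos h] at hc; exact hc)
  case isFalse h => exact absurd rfl (by rw [if_neg h] at hc; exact hc)

lemma nonX_pos (g : List (List Char)) (i j : Int) (hc : pvCell g i j ≠ 'X') :
    0 < pvNonX g :=
  Nat.lt_of_le_of_lt (Nat.zero_le _) (nonX_set_lt g i j hc)

lemma nonX_searchF_le : ∀ (f : Nat) (i j w h : Int) (g : List (List Char)),
    pvNonX ((searchF f i j w h g).2) ≤ pvNonX g := by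
  intro f
  induction f with
  | zero => intro i j w h g; simp [searchF]
  | succ f ih =>
    intro i j w h g
    rw [searchF_succ]
    have key : ∀ (ds : List (Int × Int)) (p : Int × List (List Char)),
        pvNonX ((List.foldl (pvAStep f i j w h) p ds).2) ≤ pvNonX p.2 := by
      intro ds
      induction ds with
      | nil => intro p; simp
      | cons d ds ihd =>
        intro p
        rw [List.foldl_cons]
        refine le_trans (ihd _) ?_
        unfold pvAStep
        split
        · exact ih _ _ _ _ _
        · exact le_refl _
    exact le_trans (key pvWays _) (nonX_set_le g i j)

lemma searchF_stable : ∀ (n f1 f2 : Nat) (i j w h : Int) (g : List (List Char)),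
    pvNonX g ≤ n → pvCell g i j ≠ 'X' → pvNonX g ≤ f1 → pvNonX g ≤ f2 →
    searchF f1 i j w h g = searchF f2 i j w h g := by
  intro n
  induction n with
  | zero =>
    intro f1 f2 i j w h g hn hc h1 h2
    exact absurd (nonX_pos g i j hc) (by omega)
  | succ n ih =>
    intro f1 f2 i j w h g hn hc h1 h2
    have hpos := nonX_pos g i j hc
    obtain ⟨f1', rfl⟩ : ∃ f1', f1 = f1' + 1 := ⟨f1 - 1, by omega⟩
    obtain ⟨f2', rfl⟩ : ∃ f2', f2 = f2' + 1 := ⟨f2 - 1, by omega⟩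
    rw [searchF_succ, searchF_succ]
    have hmark := nonX_set_lt g i j hc
    suffices key : ∀ (ds : List (Int × Int)) (p : Int × List (List Char)),
        pvNonX p.2 < pvNonX g →
        List.foldl (pvAStep f1' i j w h) p ds = List.foldl (pvAStep f2' i j w h) p ds from
      key pvWays _ hmark
    intro ds
    induction ds with
    | nil => intro p hp; rfl
    | cons d ds ihd =>
      intro p hp
      rw [List.foldl_cons, List.foldl_cons]
      by_cases hcnd : 0 ≤ i + d.2 ∧ i + d.2 < h ∧ 0 ≤ j + d.1 ∧ j + d.1 < w ∧
          pvCell p.2 (i + d.2) (j + d.1) ≠ 'X'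
      · have hcell' : pvCell p.2 (i + d.2) (j + d.1) ≠ 'X' := hcnd.2.2.2.2
        have heq : searchF f1' (i + d.2) (j + d.1) w h p.2
            = searchF f2' (i + d.2) (j + d.1) w h p.2 :=
          ih f1' f2' _ _ w h p.2 (by omega) hcell' (by omega) (by omega)
        have hstep : pvAStep f1' i j w h p d = pvAStep f2' i j w h p d := by
          unfold pvAStep
          rw [if_pos hcnd, if_pos hcnd, heq]
        rw [hstep]
        apply ihd
        have h2le := nonX_searchF_le f2' (i + d.2) (j + d.1) w h p.2
        unfold pvAStep
        rw [if_pos hcnd]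
        exact lt_of_le_of_lt h2le hp
      · have hstep : pvAStep f1' i j w h p d = p := by unfold pvAStep; rw [if_neg hcnd]
        have hstep2 : pvAStep f2' i j w h p d = p := by unfold pvAStep; rw [if_neg hcnd]
        rw [hstep, hstep2]
        exact ihd p hp

def pvSL (w h : Int) : List (Int × Int) → List (List Char) → Int × List (List Char)
  | [], g => (0, g)
  | (a, b) :: cs, g =>
    if 0 ≤ a ∧ a < h ∧ 0 ≤ b ∧ b < w ∧ pvCell g a b ≠ 'X' then
      let r := searchF (pvNonX g) a b w h g
      let r2 := pvSL w h cs r.2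
      (r.1 + r2.1, r2.2)
    else pvSL w h cs g

lemma nonX_SL_le (w h : Int) : ∀ (cs : List (Int × Int)) (g : List (List Char)),
    pvNonX ((pvSL w h cs g).2) ≤ pvNonX g := by
  intro cs
  induction cs with
  | nil => intro g; simp [pvSL]
  | cons c cs ih =>
    intro g
    obtain ⟨a, b⟩ := c
    show pvNonX ((pvSL w h ((a, b) :: cs) g).2) ≤ pvNonX g
    simp only [pvSL]
    split
    · exact le_trans (ih _) (nonX_searchF_le _ _ _ _ _ _)
    · exact ih g

lemma fold_eq_SL (i j w h : Int) : ∀ (ds : List (Int × Int)) (s : Int) (g : List (List Char)) (f : Nat),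
    pvNonX g ≤ f →
    List.foldl (pvAStep f i j w h) (s, g) ds
      = (s + (pvSL w h (ds.map (fun d => (i + d.2, j + d.1))) g).1,
         (pvSL w h (ds.map (fun d => (i + d.2, j + d.1))) g).2) := by
  intro ds
  induction ds with
  | nil => intro s g f hf; simp [pvSL]
  | cons d ds ihd =>
    intro s g f hf
    simp only [List.map_cons, List.foldl_cons]
    by_cases hcnd : 0 ≤ i + d.2 ∧ i + d.2 < h ∧ 0 ≤ j + d.1 ∧ j + d.1 < w ∧
        pvCell g (i + d.2) (j + d.1) ≠ 'X'
    · have hcell : pvCell g (i + d.2) (j + d.1) ≠ 'X' := hcnd.2.2.2.2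
      have hst : searchF f (i + d.2) (j + d.1) w h g
          = searchF (pvNonX g) (i + d.2) (j + d.1) w h g :=
        searchF_stable (pvNonX g) f (pvNonX g) _ _ w h g (le_refl _) hcell hf (le_refl _)
      have hstep : pvAStep f i j w h (s, g) d
          = (s + (searchF (pvNonX g) (i + d.2) (j + d.1) w h g).1,
             (searchF (pvNonX g) (i + d.2) (j + d.1) w h g).2) := by
        unfold pvAStep
        rw [if_pos hcnd, hst]
      rw [hstep]
      set r := searchF (pvNonX g) (i + d.2) (j + d.1) w h g with hr
      have hf2 : pvNonX r.2 ≤ f := le_trans (by rw [hr]; exact nonX_searchF_le _ _ _ _ _ _) hf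
      rw [ihd (s + r.1) r.2 f hf2]
      have hSL : pvSL w h ((i + d.2, j + d.1) :: ds.map (fun d => (i + d.2, j + d.1))) g
          = (r.1 + (pvSL w h (ds.map (fun d => (i + d.2, j + d.1))) r.2).1,
             (pvSL w h (ds.map (fun d => (i + d.2, j + d.1))) r.2).2) := by
        simp only [pvSL]
        rw [if_pos hcnd]
      rw [hSL]
      simp only [Prod.mk.injEq]
      exact ⟨by ring, trivial⟩
    · have hstep : pvAStep f i j w h (s, g) d = (s, g) := by
        unfold pvAStep; rw [if_neg hcnd]
      have hSL : pvSL w h ((i + d.2, j + d.1) :: ds.map (fun d => (i + d.2, j + d.1))) g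
          = pvSL w h (ds.map (fun d => (i + d.2, j + d.1))) g := by
        simp only [pvSL]
        rw [if_neg hcnd]
      rw [hstep, hSL]
      exact ihd s g f hf

lemma searchF_eq_SL (f : Nat) (i j w h : Int) (g : List (List Char))
    (hc : pvCell g i j ≠ 'X') (hf : pvNonX g ≤ f + 1) :
    searchF (f + 1) i j w h g
      = (pvDigit (pvCell g i j)
           + (pvSL w h [(i + 1, j), (i - 1, j), (i, j - 1), (i, j + 1)] (pvSet g i j 'X')).1,
         (pvSL w h [(i + 1, j), (i - 1, j), (i, j - 1), (i, j + 1)] (pvSet g i j 'X')).2) := by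
  have hmark := nonX_set_lt g i j hc
  rw [searchF_succ, fold_eq_SL i j w h pvWays _ _ f (by omega)]
  have hmap : pvWays.map (fun d => (i + d.2, j + d.1))
      = [(i + 1, j), (i - 1, j), (i, j - 1), (i, j + 1)] := by
    simp only [pvWays, List.map_cons, List.map_nil]
    norm_num
    constructor <;> ring
  rw [hmap]

lemma loopF_nil : ∀ (f : Nat) (w h : Int) (g : List (List Char)) (acc : Int),
    loopF f w h [] g acc = (acc, g) := by
  intro f w h g acc
  cases f <;> rfl

lemma loopF_stable : ∀ (k : Nat) (stack : List (Int × Int)) (g : List (List Char)) (acc : Int)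
    (f1 f2 : Nat) (w h : Int),
    5 * pvNonX g + stack.length ≤ k → 5 * pvNonX g + stack.length ≤ f1 →
    5 * pvNonX g + stack.length ≤ f2 →
    loopF f1 w h stack g acc = loopF f2 w h stack g acc := by
  intro k
  induction k with
  | zero =>
    intro stack g acc f1 f2 w h hk h1 h2
    have : stack = [] := by
      cases stack with
      | nil => rfl
      | cons c cs => simp only [List.length_cons] at hk; omega
    subst this
    rw [loopF_nil, loopF_nil]
  | succ k ih =>
    intro stack g acc f1 f2 w h hk h1 h2
    cases stack with
    | nil => rw [loopF_nil, loopF_nil]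
    | cons c rest =>
      obtain ⟨a, b⟩ := c
      simp only [List.length_cons] at hk h1 h2
      obtain ⟨f1', rfl⟩ : ∃ f1', f1 = f1' + 1 := ⟨f1 - 1, by omega⟩
      obtain ⟨f2', rfl⟩ : ∃ f2', f2 = f2' + 1 := ⟨f2 - 1, by omega⟩
      simp only [loopF]
      by_cases hcnd : ¬(0 ≤ a ∧ a < h ∧ 0 ≤ b ∧ b < w) ∨ pvCell g a b = 'X'
      · rw [if_pos hcnd, if_pos hcnd]
        exact ih rest g acc f1' f2' w h (by omega) (by omega) (by omega)
      · rw [if_neg hcnd, if_neg hcnd]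
        have hc : pvCell g a b ≠ 'X' := by tauto
        have hm := nonX_set_lt g a b hc
        apply ih _ _ _ f1' f2' w h <;> simp only [List.length_append, List.length_cons,
          List.length_nil] <;> omega

lemma loop_bridge : ∀ (k : Nat) (cells : List (Int × Int)) (g : List (List Char))
    (rest : List (Int × Int)) (acc : Int) (f : Nat) (w h : Int),
    cells.length + 5 * pvNonX g ≤ k →
    5 * pvNonX g + cells.length + rest.length ≤ f →
    loopF f w h (cells ++ rest) g acc
      = loopF (5 * pvNonX ((pvSL w h cells g).2) + rest.length) w h rest ((pvSL w h cells g).2)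
          (acc + (pvSL w h cells g).1) := by
  intro k
  induction k with
  | zero =>
    intro cells g rest acc f w h hk hf
    have hnil : cells = [] := by
      cases cells with
      | nil => rfl
      | cons c cs => simp only [List.length_cons] at hk; omega
    subst hnil
    simp only [pvSL, List.nil_append, add_zero]
    exact loopF_stable f rest g acc f _ w h (by simpa using hf) (by simpa using hf) (le_refl _)
  | succ k ih =>
    intro cells g rest acc f w h hk hf
    cases cells with
    | nil =>
      simp only [pvSL, List.nil_append, add_zero]
      exact loopF_stable f rest g acc f _ w h (by simpa using hf) (by simpa using hf) (le_refl _)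
    | cons c cs =>
      obtain ⟨a, b⟩ := c
      simp only [List.length_cons] at hk hf
      obtain ⟨f', rfl⟩ : ∃ f', f = f' + 1 := ⟨f - 1, by omega⟩
      rw [List.cons_append]
      simp only [loopF]
      by_cases P : 0 ≤ a ∧ a < h ∧ 0 ≤ b ∧ b < w ∧ pvCell g a b ≠ 'X'
      · have hguard : ¬(¬(0 ≤ a ∧ a < h ∧ 0 ≤ b ∧ b < w) ∨ pvCell g a b = 'X') := by tauto
        rw [if_neg hguard]
        have hc : pvCell g a b ≠ 'X' := P.2.2.2.2
        have hm := nonX_set_lt g a b hc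
        have hpos := nonX_pos g a b hc
        -- drain the four pushed neighbours with the IH, then the remaining seeds
        have h1 := ih [(a + 1, b), (a - 1, b), (a, b - 1), (a, b + 1)] (pvSet g a b 'X')
          (cs ++ rest) (acc + pvDigit (pvCell g a b)) f' w h
          (by simp only [List.length_cons, List.length_nil]; omega)
          (by simp only [List.length_cons, List.length_nil, List.length_append]; omega)
        rw [h1]
        set G1 := (pvSL w h [(a + 1, b), (a - 1, b), (a, b - 1), (a, b + 1)] (pvSet g a b 'X')).2 with hG1
        set S1 := (pvSL w h [(a + 1, b), (a - 1, b), (a, b - 1), (a, b + 1)] (pvSet g a b 'X')).1 with hS1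
        have hle1 : pvNonX G1 ≤ pvNonX (pvSet g a b 'X') := by
          rw [hG1]; exact nonX_SL_le w h _ _
        have h2 := ih cs G1 rest (acc + pvDigit (pvCell g a b) + S1)
          (5 * pvNonX G1 + (cs ++ rest).length) w h
          (by omega)
          (by simp only [List.length_append]; omega)
        rw [h2]
        -- identify A's search step with the head step of pvSL
        have hnx : pvNonX g = (pvNonX g - 1) + 1 := by omega
        have hsearch : searchF (pvNonX g) a b w h g
            = (pvDigit (pvCell g a b) + S1, G1) := by
          rw [hnx, searchF_eq_SL (pvNonX g - 1) a b w h g hc (by omega), hS1, hG1]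
        have hSL : pvSL w h ((a, b) :: cs) g
            = (pvDigit (pvCell g a b) + S1 + (pvSL w h cs G1).1, (pvSL w h cs G1).2) := by
          simp only [pvSL]
          rw [if_pos P, hsearch]
        rw [hSL]
        congr 1
        ring
      · have hguard : (¬(0 ≤ a ∧ a < h ∧ 0 ≤ b ∧ b < w) ∨ pvCell g a b = 'X') := by tauto
        rw [if_pos hguard]
        have hSL : pvSL w h ((a, b) :: cs) g = pvSL w h cs g := by
          simp only [pvSL]; rw [if_neg P]
        rw [hSL]
        exact ih cs g rest acc f' w h (by omega) (by omega)

lemma seed_bridge (i j w h : Int) (g : List (List Char))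
    (hi : 0 ≤ i) (hih : i < h) (hj : 0 ≤ j) (hjw : j < w) (hc : pvCell g i j ≠ 'X') :
    loopF (5 * pvNonX g + 1) w h [(i, j)] g 0 = searchF (pvNonX g) i j w h g := by
  have h1 := loop_bridge (1 + 5 * pvNonX g) [(i, j)] g [] 0 (5 * pvNonX g + 1) w h
    (by simp only [List.length_cons, List.length_nil]; omega)
    (by simp only [List.length_cons, List.length_nil]; omega)
  rw [List.append_nil] at h1
  rw [h1, loopF_nil]
  have hSL : pvSL w h [(i, j)] g
      = ((searchF (pvNonX g) i j w h g).1 + 0, (searchF (pvNonX g) i j w h g).2) := by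
    simp only [pvSL]
    rw [if_pos ⟨hi, hih, hj, hjw, hc⟩]
  rw [hSL]
  simp

lemma inner_eq (w h i : Int) : ∀ (js : List Int), (∀ j ∈ js, 0 ≤ j ∧ j < w) →
    0 ≤ i → i < h → ∀ st : List Int × List (List Char),
    js.foldl (fun st j => if pvCell st.2 i j ≠ 'X' then
        let r := searchF (pvNonX st.2) i j w h st.2
        (st.1 ++ [r.1], r.2)
      else st) st
    = js.foldl (fun st j => if pvCell st.2 i j ≠ 'X' then
        let r := loopF (5 * pvNonX st.2 + 1) w h [(i, j)] st.2 0
        (st.1 ++ [r.1], r.2)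
      else st) st := by
  intro js
  induction js with
  | nil => intro _ _ _ st; rfl
  | cons j js ihj =>
    intro hjs hi hih st
    obtain ⟨hj, hjw⟩ := hjs j (by simp)
    rw [List.foldl_cons, List.foldl_cons]
    by_cases hc : pvCell st.2 i j ≠ 'X'
    · rw [if_pos hc, if_pos hc]
      rw [seed_bridge i j w h st.2 hi hih hj hjw hc]
      exact ihj (fun x hx => hjs x (List.mem_cons_of_mem _ hx)) hi hih _
    · rw [if_neg hc, if_neg hc]
      exact ihj (fun x hx => hjs x (List.mem_cons_of_mem _ hx)) hi hih st

lemma outer_eq (w h : Int) : ∀ (is : List Int), (∀ i ∈ is, 0 ≤ i ∧ i < h) →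
    ∀ st : List Int × List (List Char),
    is.foldl (fun st i => (PySem.List.pyRange 0 w 1).foldl (fun st j =>
        if pvCell st.2 i j ≠ 'X' then
          let r := searchF (pvNonX st.2) i j w h st.2
          (st.1 ++ [r.1], r.2)
        else st) st) st
    = is.foldl (fun st i => (PySem.List.pyRange 0 w 1).foldl (fun st j =>
        if pvCell st.2 i j ≠ 'X' then
          let r := loopF (5 * pvNonX st.2 + 1) w h [(i, j)] st.2 0
          (st.1 ++ [r.1], r.2)
        else st) st) st := by
  intro is
  induction is with
  | nil => intro _ st; rfl
  | cons i is ihi =>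
    intro his st
    obtain ⟨hi, hih⟩ := his i (by simp)
    rw [List.foldl_cons, List.foldl_cons]
    rw [inner_eq w h i (PySem.List.pyRange 0 w 1)
      (fun j hj => (PySem.List.mem_pyRange_one.mp hj)) hi hih st]
    exact ihi (fun x hx => his x (List.mem_cons_of_mem _ hx)) _

theorem solution_equiv : ∀ maps, solution maps = solution_alt maps := by
  intro maps
  unfold solution solution_alt
  dsimp only
  rw [outer_eq ((maps.headD "").toList.length : Int) (maps.length : Int)
    (PySem.List.pyRange 0 (maps.length : Int) 1)
    (fun i hi => PySem.List.mem_pyRange_one.mp hi)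
    (([] : List Int), maps.map (fun s => s.toList))]

-- ===== VERDICT (by name: the statement is the Claim_ definition above) =====
theorem solution_spec : Claim_equal_solution := by
  intro maps _ _
  unfold Spec_solution
  exact solution_equiv maps
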